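-- pv_equiv track=rewrite | github.com/anphipolito/n8n-health-monitor | rules/loop_too_many_nodes.py | _count_loop_body_nodes
-- ===== SOURCE A (Python) =====
-- from collections import deque
--
-- def _count_loop_body_nodes(loop_node_name, connections):
--     """
--     BFS from the loop node's first output branch (index 0).
--     n8n's Loop Over Items node outputs:
--       - branch 0 ("loop"): the body nodes
--       - branch 1 ("done"): the exit path
--     We follow branch 0 and stop if we reach the loop node again (cycle back).
--     Returns the count of distinct nodes visited inside the loop body.
--     """
--     outgoing = connections.get(loop_node_name, {}).get("main", [])
--     if not outgoing:
--         return 0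
--
--     # outgoing[0] is the loop-body branch; outgoing[1] (if present) is the done branch
--     body_starts = [edge["node"] for edge in outgoing[0] if "node" in edge]
--
--     visited = set()
--     queue = deque(body_starts)
--
--     while queue:
--         name = queue.popleft()
--         # Stop if already counted or if we've looped back to the loop node itself
--         if name in visited or name == loop_node_name:
--             continue
--         visited.add(name)
--         for branch in connections.get(name, {}).get("main", []):
--             for edge in branch:
--                 target = edge.get("node")
--                 if target and target not in visited and target != loop_node_name:
--                     queue.append(target)
--
--     return len(visited)
-- ===== SOURCE B (Python) =====
-- def _count_loop_body_nodes(loop_node_name, connections):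
--     """Recursive DFS over the loop-body branch; same count as the BFS version."""
--     outgoing = connections.get(loop_node_name, {}).get("main", [])
--     if not outgoing:
--         return 0
--
--     visited = set()
--
--     def visit(name):
--         if name in visited or name == loop_node_name:
--             return
--         visited.add(name)
--         for branch in connections.get(name, {}).get("main", []):
--             for edge in branch:
--                 target = edge.get("node")
--                 if target:
--                     visit(target)
--
--     for edge in outgoing[0]:
--         if "node" in edge:
--             visit(edge["node"])
--
--     return len(visited)
-- ===== Notes on version B (the rewrite author's own statement) =====
-- stated objective: alternative
-- what changed: Replaces the iterative deque-based BFS worklist loop with a recursive DFS helper that threads a shared visited set and recurses on each edge target.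
import Mathlib
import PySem

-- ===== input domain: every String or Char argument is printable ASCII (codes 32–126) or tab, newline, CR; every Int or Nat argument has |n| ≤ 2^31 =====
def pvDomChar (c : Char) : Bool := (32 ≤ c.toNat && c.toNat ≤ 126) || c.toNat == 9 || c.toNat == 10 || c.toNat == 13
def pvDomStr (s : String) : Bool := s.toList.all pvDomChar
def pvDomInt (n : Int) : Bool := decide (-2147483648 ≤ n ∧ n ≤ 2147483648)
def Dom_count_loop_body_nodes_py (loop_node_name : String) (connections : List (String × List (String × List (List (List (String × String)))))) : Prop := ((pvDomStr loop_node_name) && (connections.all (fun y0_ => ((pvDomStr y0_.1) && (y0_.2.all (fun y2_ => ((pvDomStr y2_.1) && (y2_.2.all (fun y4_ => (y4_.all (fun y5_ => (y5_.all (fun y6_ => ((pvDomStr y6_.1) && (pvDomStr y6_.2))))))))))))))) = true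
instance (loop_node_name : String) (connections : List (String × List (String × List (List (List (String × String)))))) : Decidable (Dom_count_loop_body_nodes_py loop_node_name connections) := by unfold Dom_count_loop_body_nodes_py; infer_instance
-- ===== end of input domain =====

-- B replaces A's iterative deque-based BFS with a recursive DFS threading a shared visited set (alternative decomposition, same cost).


abbrev PvConn := List (String × List (String × List (List (List (String × String)))))

-- ===== PORT A =====
-- shared helpers (both Pythons do connections.get(name, {}).get("main", []) and edge.get("node"); dict lookup = first match)
def pvGetMain (connections : PvConn) (name : String) : List (List (List (String × String))) :=
  match connections.find? (fun p => p.1 == name) with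
  | none => []
  | some p =>
    match p.2.find? (fun q => q.1 == "main") with
    | none => []
    | some q => q.2

def pvEdgeNode? (edge : List (String × String)) : Option String :=
  (edge.find? (fun kv => kv.1 == "node")).map (·.2)

-- all dict values appearing as edge targets anywhere in connections (a finite universe used only for termination)
def pvTargets (connections : PvConn) : List String :=
  connections.flatMap (fun p => p.2.flatMap (fun q => q.2.flatMap (fun br => br.flatMap (fun e => e.map (·.2)))))

-- termination measure: nodes of U not yet visited
def pvMeas (U : List String) (v : List String) : Nat :=
  (U.filter (fun u => !(v.contains u))).length

theorem pvMeas_le (U : List String) {v w : List String} (h : v ⊆ w) : pvMeas U w ≤ pvMeas U v := by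
  apply List.Sublist.length_le
  apply List.monotone_filter_right
  intro x hx
  have hw : x ∉ w := by simpa using hx
  simpa using fun hv => hw (h hv)

theorem pvMeas_lt (U : List String) {v : List String} {x : String} (hU : x ∈ U) (hx : x ∉ v) :
    pvMeas U (PySem.Set.add v x) < pvMeas U v := by
  have hsub : (U.filter (fun u => !((PySem.Set.add v x).contains u))).Sublist (U.filter (fun u => !(v.contains u))) := by
    apply List.monotone_filter_right
    intro y hy
    have ha : y ∉ PySem.Set.add v x := by simpa using hy
    simpa using fun hv => ha ((PySem.Set.mem_add v x y).mpr (Or.inl hv))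
  apply Nat.lt_of_le_of_ne (hsub.length_le)
  intro hlen
  have heq := hsub.eq_of_length hlen
  have hx1 : x ∈ U.filter (fun u => !(v.contains u)) := by
    simp [List.mem_filter, hU, hx]
  rw [← heq] at hx1
  simp [List.mem_filter, PySem.Set.mem_add] at hx1

-- the targets A enqueues from node `name` given current visited set `v`
def pvEnqA (connections : PvConn) (loop : String) (name : String) (v : PySem.Set String) : List String :=
  (pvGetMain connections name).flatMap (fun branch =>
    branch.filterMap (fun edge =>
      (pvEdgeNode? edge).bind (fun t => if t ≠ "" ∧ t ∉ v ∧ t ≠ loop then some t else none)))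

-- successors followed by B from node `name`: every non-empty target of any edge
def pvSuccs (connections : PvConn) (name : String) : List String :=
  (pvGetMain connections name).flatMap (fun branch =>
    branch.filterMap (fun edge =>
      (pvEdgeNode? edge).bind (fun t => if t ≠ "" then some t else none)))

theorem pvSuccs_subset_targets (connections : PvConn) (name : String) {t : String}
    (ht : t ∈ pvSuccs connections name) : t ∈ pvTargets connections := by
  simp only [pvSuccs, List.mem_flatMap, List.mem_filterMap, Option.bind_eq_some_iff] at ht
  obtain ⟨br, hbr, e, he, s, hs, hif⟩ := ht
  have hst : s = t := by
      by_cases h : s ≠ ""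
      · rw [if_pos h] at hif; exact Option.some.inj hif
      · rw [if_neg h] at hif; exact absurd hif (by simp)
  subst hst
  have hmain : ∃ p ∈ connections, ∃ q ∈ p.2, br ∈ q.2 := by
    unfold pvGetMain at hbr
    rcases hp : connections.find? (fun p => p.1 == name) with _ | p
    · simp [hp] at hbr
    · rcases hq : p.2.find? (fun q => q.1 == "main") with _ | q
      · simp [hp, hq] at hbr
      · simp only [hp, hq] at hbr
        exact ⟨p, List.mem_of_find?_eq_some hp, q, List.mem_of_find?_eq_some hq, hbr⟩
  obtain ⟨p, hpmem, q, hqmem, hbrmem⟩ := hmain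
  obtain ⟨kv, hkv, hkvt⟩ : ∃ kv ∈ e, kv.2 = s := by
    simp only [pvEdgeNode?, Option.map_eq_some_iff] at hs
    obtain ⟨kv, hfind, h2⟩ := hs
    exact ⟨kv, List.mem_of_find?_eq_some hfind, h2⟩
  simp only [pvTargets, List.mem_flatMap, List.mem_map]
  exact ⟨p, hpmem, q, hqmem, br, hbrmem, e, he, kv, hkv, hkvt⟩

theorem pvEnqA_subset_succs (connections : PvConn) (loop name : String) (v : PySem.Set String) {t : String}
    (ht : t ∈ pvEnqA connections loop name v) : t ∈ pvSuccs connections name := by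
  simp only [pvEnqA, pvSuccs, List.mem_flatMap, List.mem_filterMap, Option.bind_eq_some_iff] at ht ⊢
  obtain ⟨br, hbr, e, he, s, hs, hif⟩ := ht
  refine ⟨br, hbr, e, he, s, hs, ?_⟩
  by_cases h : s ≠ "" ∧ s ∉ v ∧ s ≠ loop
  · simp only [if_pos h] at hif; simp [h.1, hif]
  · simp [h] at hif

-- the BFS worklist loop of A (U, hU, hq are termination plumbing only)
def pvBFS (loop : String) (connections : PvConn) (U : List String)
    (hU : ∀ t ∈ pvTargets connections, t ∈ U) :
    (visited : PySem.Set String) → (queue : List String) → (hq : ∀ x ∈ queue, x ∈ U) → PySem.Set String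
  | visited, [], _ => visited
  | visited, name :: rest, hq =>
    if hskip : name ∈ visited ∨ name = loop then
      pvBFS loop connections U hU visited rest (fun x hx => hq x (List.mem_cons_of_mem _ hx))
    else
      let visited' := PySem.Set.add visited name
      pvBFS loop connections U hU visited' (rest ++ pvEnqA connections loop name visited')
        (fun x hx => (List.mem_append.mp hx).elim (fun h => hq x (List.mem_cons_of_mem _ h))
          (fun h => hU x (pvSuccs_subset_targets connections name (pvEnqA_subset_succs connections loop name visited' h))))
  termination_by visited queue _ => (pvMeas U visited, queue.length)
  decreasing_by
  · exact Prod.Lex.right _ (Nat.lt_succ_self _)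
  · exact Prod.Lex.left _ _ (pvMeas_lt U (hq name List.mem_cons_self) (fun h => hskip (Or.inl h)))

def count_loop_body_nodes_py (loop_node_name : String) (connections : List (String × List (String × List (List (List (String × String)))))) : Int :=
  match pvGetMain connections loop_node_name with
  | [] => 0
  | first :: _ =>
    let body_starts := first.filterMap pvEdgeNode?
    let U := body_starts ++ pvTargets connections
    ((pvBFS loop_node_name connections U (fun _t ht => List.mem_append.mpr (Or.inr ht))
        PySem.Set.empty body_starts (fun _x hx => List.mem_append.mpr (Or.inl hx))).length : Int)

-- ===== PORT B =====
-- B's recursive visit(): processes a worklist where each node's successors are visited before the rest (DFS);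
-- returns the visited set together with the monotonicity fact the recursion itself needs.
def pvDFS (loop : String) (connections : PvConn) (U : List String)
    (hU : ∀ t ∈ pvTargets connections, t ∈ U) :
    (ts : List String) → (visited : PySem.Set String) → (h : ∀ t ∈ ts, t ∈ U) → {v : PySem.Set String // visited ⊆ v}
  | [], visited, _ => ⟨visited, fun _ h => h⟩
  | t :: ts, visited, h =>
    if hskip : t ∈ visited ∨ t = loop then
      pvDFS loop connections U hU ts visited (fun x hx => h x (List.mem_cons_of_mem _ hx))
    else
      let visited' := PySem.Set.add visited t
      let r1 := pvDFS loop connections U hU (pvSuccs connections t) visited'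
        (fun s hs => hU s (pvSuccs_subset_targets connections t hs))
      let r2 := pvDFS loop connections U hU ts r1.1 (fun x hx => h x (List.mem_cons_of_mem _ hx))
      ⟨r2.1, fun x hx => r2.2 (r1.2 ((PySem.Set.mem_add _ _ _).mpr (Or.inl hx)))⟩
  termination_by ts visited _ => (pvMeas U visited, ts.length)
  decreasing_by
  · exact Prod.Lex.right _ (Nat.lt_succ_self _)
  · exact Prod.Lex.left _ _ (pvMeas_lt U (h t List.mem_cons_self) (fun hm => hskip (Or.inl hm)))
  · exact Prod.Lex.left _ _ (Nat.lt_of_le_of_lt (pvMeas_le U r1.2)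
      (pvMeas_lt U (h t List.mem_cons_self) (fun hm => hskip (Or.inl hm))))

def count_loop_body_nodes_py_alt (loop_node_name : String) (connections : List (String × List (String × List (List (List (String × String)))))) : Int :=
  match pvGetMain connections loop_node_name with
  | [] => 0
  | first :: _ =>
    let seeds := first.filterMap pvEdgeNode?
    let U := seeds ++ pvTargets connections
    (((pvDFS loop_node_name connections U (fun _t ht => List.mem_append.mpr (Or.inr ht))
        seeds PySem.Set.empty (fun _x hx => List.mem_append.mpr (Or.inl hx))).1.length : Nat) : Int)

-- ===== PRECONDITION & SPEC =====
def Spec_count_loop_body_nodes_py (loop_node_name : String) (connections : List (String × List (String × List (List (List (String × String)))))) (out : Int) : Prop := out = count_loop_body_nodes_py_alt loop_node_name connections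
instance (loop_node_name : String) (connections : List (String × List (String × List (List (List (String × String)))))) (out : Int) : Decidable (Spec_count_loop_body_nodes_py loop_node_name connections out) := by unfold Spec_count_loop_body_nodes_py; infer_instance

-- ===== CLAIM (what is proved, stated in full; the proofs are below) =====
def Claim_equal_count_loop_body_nodes_py : Prop := ∀ (loop_node_name : String) (connections : List (String × List (String × List (List (List (String × String)))))), Dom_count_loop_body_nodes_py loop_node_name connections → Spec_count_loop_body_nodes_py loop_node_name connections (count_loop_body_nodes_py loop_node_name connections)

-- ===== LEMMAS AND PROOFS =====
-- nodes reachable from the seed list following non-empty edge targets, never entering the loop node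
inductive pvReach (loop : String) (connections : PvConn) (seeds : List String) : String → Prop
  | seed (s : String) : s ∈ seeds → s ≠ loop → pvReach loop connections seeds s
  | step (x t : String) : pvReach loop connections seeds x → t ∈ pvSuccs connections x → t ≠ loop →
      pvReach loop connections seeds t

theorem mem_pvEnqA (connections : PvConn) (loop name : String) (v : PySem.Set String) (t : String) :
    t ∈ pvEnqA connections loop name v ↔ t ∈ pvSuccs connections name ∧ t ∉ v ∧ t ≠ loop := by
  simp only [pvEnqA, pvSuccs, List.mem_flatMap, List.mem_filterMap, Option.bind_eq_some_iff]
  constructor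
  · rintro ⟨br, hbr, e, he, s, hs, hif⟩
    by_cases h : s ≠ "" ∧ s ∉ v ∧ s ≠ loop
    · simp only [if_pos h] at hif
      obtain ⟨h1, h2, h3⟩ := h
      cases Option.some.inj hif
      exact ⟨⟨br, hbr, e, he, _, hs, by simp [h1]⟩, h2, h3⟩
    · simp [h] at hif
  · rintro ⟨⟨br, hbr, e, he, s, hs, hif⟩, hv, hl⟩
    have hst : s = t := by
      by_cases h : s ≠ ""
      · rw [if_pos h] at hif; exact Option.some.inj hif
      · rw [if_neg h] at hif; exact absurd hif (by simp)
    subst hst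
    have hne : s ≠ "" := by intro h; simp [h] at hif
    exact ⟨br, hbr, e, he, s, hs, by simp [hne, hv, hl]⟩

theorem pvBFS_sound (loop : String) (connections : PvConn) (U : List String)
    (hU : ∀ t ∈ pvTargets connections, t ∈ U) (seeds : List String) :
    ∀ (visited : PySem.Set String) (queue : List String) (hq : ∀ x ∈ queue, x ∈ U),
      (∀ v ∈ visited, pvReach loop connections seeds v) →
      (∀ q ∈ queue, q ≠ loop → pvReach loop connections seeds q) →
      ∀ x ∈ pvBFS loop connections U hU visited queue hq, pvReach loop connections seeds x := by
  intro visited queue hq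
  induction visited, queue, hq using pvBFS.induct loop connections U hU with
  | case1 visited _ _ =>
    intro hv _ x hx
    rw [pvBFS] at hx
    exact hv x hx
  | case2 visited name rest hq hskip _ ih =>
    intro hv hqr x hx
    rw [pvBFS] at hx
    rw [dif_pos hskip] at hx
    exact ih hv (fun q hq' hne => hqr q (List.mem_cons_of_mem _ hq') hne) x hx
  | case3 visited name rest hq hskip visited' _ ih =>
    intro hv hqr x hx
    rw [pvBFS] at hx
    rw [dif_neg hskip] at hx
    have hname : pvReach loop connections seeds name :=
      hqr name List.mem_cons_self (fun h => hskip (Or.inr h))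
    refine ih ?_ ?_ x hx
    · intro v hvm
      rcases (PySem.Set.mem_add visited name v).mp hvm with h | h
      · exact hv v h
      · exact h ▸ hname
    · intro q hqm hqne
      rcases List.mem_append.mp hqm with h | h
      · exact hqr q (List.mem_cons_of_mem _ h) hqne
      · obtain ⟨hsucc, _, hne⟩ := (mem_pvEnqA connections loop name _ q).mp h
        exact pvReach.step name q hname hsucc hne

theorem pvBFS_closed (loop : String) (connections : PvConn) (U : List String)
    (hU : ∀ t ∈ pvTargets connections, t ∈ U) (seeds : List String) :
    ∀ (visited : PySem.Set String) (queue : List String) (hq : ∀ x ∈ queue, x ∈ U),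
      (∀ s ∈ seeds, s = loop ∨ s ∈ visited ∨ s ∈ queue) →
      (∀ v ∈ visited, ∀ t ∈ pvSuccs connections v, t = loop ∨ t ∈ visited ∨ t ∈ queue) →
      (∀ s ∈ seeds, s = loop ∨ s ∈ pvBFS loop connections U hU visited queue hq) ∧
      (∀ v ∈ pvBFS loop connections U hU visited queue hq, ∀ t ∈ pvSuccs connections v,
        t = loop ∨ t ∈ pvBFS loop connections U hU visited queue hq) := by
  intro visited queue hq
  induction visited, queue, hq using pvBFS.induct loop connections U hU with
  | case1 visited _ _ =>
    intro hseed hclosed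
    rw [pvBFS]
    constructor
    · intro s hs
      rcases hseed s hs with h | h | h
      · exact Or.inl h
      · exact Or.inr h
      · simp at h
    · intro v hv t ht
      rcases hclosed v hv t ht with h | h | h
      · exact Or.inl h
      · exact Or.inr h
      · simp at h
  | case2 visited name rest hq hskip _ ih =>
    intro hseed hclosed
    rw [pvBFS]
    rw [dif_pos hskip]
    have hmem : ∀ y : String, y ∈ name :: rest → y = loop ∨ y ∈ visited ∨ y ∈ rest := by
      intro y hy
      rcases List.mem_cons.mp hy with rfl | h
      · rcases hskip with h | h
        · exact Or.inr (Or.inl h)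
        · exact Or.inl h
      · exact Or.inr (Or.inr h)
    refine ih ?_ ?_
    · intro s hs
      rcases hseed s hs with h | h | h
      · exact Or.inl h
      · exact Or.inr (Or.inl h)
      · exact hmem s h
    · intro v hv t ht
      rcases hclosed v hv t ht with h | h | h
      · exact Or.inl h
      · exact Or.inr (Or.inl h)
      · exact hmem t h
  | case3 visited name rest hq hskip visited' _ ih =>
    intro hseed hclosed
    rw [pvBFS]
    rw [dif_neg hskip]
    have hvsub : ∀ y : String, y ∈ visited → y ∈ PySem.Set.add visited name :=
      fun y hy => (PySem.Set.mem_add visited name y).mpr (Or.inl hy)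
    have hmem : ∀ y : String, y ∈ name :: rest →
        y ∈ PySem.Set.add visited name ∨ y ∈ rest ++ pvEnqA connections loop name (PySem.Set.add visited name) := by
      intro y hy
      rcases List.mem_cons.mp hy with rfl | h
      · exact Or.inl ((PySem.Set.mem_add visited y y).mpr (Or.inr rfl))
      · exact Or.inr (List.mem_append.mpr (Or.inl h))
    refine ih ?_ ?_
    · intro s hs
      rcases hseed s hs with h | h | h
      · exact Or.inl h
      · exact Or.inr (Or.inl (hvsub s h))
      · rcases hmem s h with h' | h'
        · exact Or.inr (Or.inl h')
        · exact Or.inr (Or.inr h')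
    · intro v hv t ht
      rcases (PySem.Set.mem_add visited name v).mp hv with hvm | rfl
      · rcases hclosed v hvm t ht with h | h | h
        · exact Or.inl h
        · exact Or.inr (Or.inl (hvsub t h))
        · rcases hmem t h with h' | h'
          · exact Or.inr (Or.inl h')
          · exact Or.inr (Or.inr h')
      · by_cases hl : t = loop
        · exact Or.inl hl
        by_cases hm : t ∈ PySem.Set.add visited v
        · exact Or.inr (Or.inl hm)
        refine Or.inr (Or.inr (List.mem_append.mpr (Or.inr ?_)))
        exact (mem_pvEnqA connections loop v _ t).mpr ⟨ht, hm, hl⟩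

theorem pvBFS_nodup (loop : String) (connections : PvConn) (U : List String)
    (hU : ∀ t ∈ pvTargets connections, t ∈ U) :
    ∀ (visited : PySem.Set String) (queue : List String) (hq : ∀ x ∈ queue, x ∈ U),
      visited.Nodup → (pvBFS loop connections U hU visited queue hq).Nodup := by
  intro visited queue hq
  induction visited, queue, hq using pvBFS.induct loop connections U hU with
  | case1 visited _ _ => intro hnd; rw [pvBFS]; exact hnd
  | case2 visited name rest hq hskip _ ih => intro hnd; rw [pvBFS]; rw [dif_pos hskip]; exact ih hnd
  | case3 visited name rest hq hskip visited' _ ih =>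
    intro hnd
    rw [pvBFS]
    rw [dif_neg hskip]
    exact ih (PySem.Set.nodup_add visited name hnd)

theorem pvDFS_sound (loop : String) (connections : PvConn) (U : List String)
    (hU : ∀ t ∈ pvTargets connections, t ∈ U) (seeds : List String) :
    ∀ (ts : List String) (visited : PySem.Set String) (h : ∀ t ∈ ts, t ∈ U),
      (∀ v ∈ visited, pvReach loop connections seeds v) →
      (∀ t ∈ ts, t ≠ loop → pvReach loop connections seeds t) →
      ∀ x ∈ (pvDFS loop connections U hU ts visited h).1, pvReach loop connections seeds x := by
  intro ts visited h
  induction ts, visited, h using pvDFS.induct loop connections U hU with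
  | case1 visited _ _ =>
    intro hv _ x hx
    rw [pvDFS] at hx
    exact hv x hx
  | case2 t ts visited h hskip _ ih =>
    intro hv hts x hx
    rw [pvDFS] at hx
    rw [dif_pos hskip] at hx
    exact ih hv (fun u hu hne => hts u (List.mem_cons_of_mem _ hu) hne) x hx
  | case3 t ts visited h hskip v' r1 hex ihA ihB ihC ihD ihE =>
    intro hv hts x hx
    rw [pvDFS] at hx
    rw [dif_neg hskip] at hx
    have ht : pvReach loop connections seeds t :=
      hts t List.mem_cons_self (fun hh => hskip (Or.inr hh))
    have hv' : ∀ v ∈ PySem.Set.add visited t, pvReach loop connections seeds v := by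
      intro v hvm
      rcases (PySem.Set.mem_add visited t v).mp hvm with hh | rfl
      · exact hv v hh
      · exact ht
    have hinner := ihB hv' (fun s hs hne => pvReach.step t s ht hs hne)
    exact ihE hinner (fun u hu hne => hts u (List.mem_cons_of_mem _ hu) hne) x hx

theorem pvDFS_post (loop : String) (connections : PvConn) (U : List String)
    (hU : ∀ t ∈ pvTargets connections, t ∈ U) :
    ∀ (ts : List String) (visited : PySem.Set String) (h : ∀ t ∈ ts, t ∈ U),
      (∀ t ∈ ts, t = loop ∨ t ∈ (pvDFS loop connections U hU ts visited h).1) ∧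
      (∀ x ∈ (pvDFS loop connections U hU ts visited h).1, x ∈ visited ∨
        (∀ s ∈ pvSuccs connections x, s = loop ∨ s ∈ (pvDFS loop connections U hU ts visited h).1)) := by
  intro ts visited h
  induction ts, visited, h using pvDFS.induct loop connections U hU with
  | case1 visited _ _ =>
    rw [pvDFS]
    exact ⟨by simp, fun x hx => Or.inl hx⟩
  | case2 t ts visited h hskip _ ih =>
    rw [pvDFS]
    rw [dif_pos hskip]
    obtain ⟨a2, b2⟩ := ih
    refine ⟨?_, b2⟩
    intro u hu
    rcases List.mem_cons.mp hu with rfl | hu'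
    · rcases hskip with hh | hh
      · exact Or.inr ((pvDFS loop connections U hU ts visited _).2 hh)
      · exact Or.inl hh
    · exact a2 u hu'
  | case3 t ts visited h hskip v' r1 hex ihA ihB ihC ihD ihE =>
    rw [pvDFS]
    rw [dif_neg hskip]
    obtain ⟨a1, b1⟩ := ihB
    obtain ⟨a2, b2⟩ := ihE
    have hinner_sub := (pvDFS loop connections U hU (pvSuccs connections t) (PySem.Set.add visited t)
      (fun s hs => hU s (pvSuccs_subset_targets connections t hs))).2
    have houter_sub := (pvDFS loop connections U hU ts
      (pvDFS loop connections U hU (pvSuccs connections t) (PySem.Set.add visited t)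
        (fun s hs => hU s (pvSuccs_subset_targets connections t hs))).1
      (fun u hu => h u (List.mem_cons_of_mem _ hu))).2
    constructor
    · intro u hu
      rcases List.mem_cons.mp hu with rfl | hu'
      · exact Or.inr (houter_sub (hinner_sub ((PySem.Set.mem_add visited u u).mpr (Or.inr rfl))))
      · exact a2 u hu'
    · intro x hx
      rcases b2 x hx with hmem | hcl
      · rcases b1 x hmem with hmem' | hcl'
        · rcases (PySem.Set.mem_add visited t x).mp hmem' with hvv | rfl
          · exact Or.inl hvv
          · refine Or.inr ?_
            intro s hs
            rcases a1 s hs with hh | hh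
            · exact Or.inl hh
            · exact Or.inr (houter_sub hh)
        · refine Or.inr ?_
          intro s hs
          rcases hcl' s hs with hh | hh
          · exact Or.inl hh
          · exact Or.inr (houter_sub hh)
      · exact Or.inr hcl

theorem pvDFS_nodup (loop : String) (connections : PvConn) (U : List String)
    (hU : ∀ t ∈ pvTargets connections, t ∈ U) :
    ∀ (ts : List String) (visited : PySem.Set String) (h : ∀ t ∈ ts, t ∈ U),
      visited.Nodup → (pvDFS loop connections U hU ts visited h).1.Nodup := by
  intro ts visited h
  induction ts, visited, h using pvDFS.induct loop connections U hU with
  | case1 visited _ _ => intro hnd; rw [pvDFS]; exact hnd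
  | case2 t ts visited h hskip _ ih => intro hnd; rw [pvDFS]; rw [dif_pos hskip]; exact ih hnd
  | case3 t ts visited h hskip v' r1 hex ihA ihB ihC ihD ihE =>
    intro hnd
    rw [pvDFS]
    rw [dif_neg hskip]
    exact ihE (ihB (PySem.Set.nodup_add visited t hnd))

-- a set containing the eligible seeds and closed under eligible successors contains everything reachable
theorem pvReach_subset (loop : String) (connections : PvConn) (seeds : List String) (V : List String)
    (hseed : ∀ s ∈ seeds, s = loop ∨ s ∈ V)
    (hclosed : ∀ v ∈ V, ∀ t ∈ pvSuccs connections v, t = loop ∨ t ∈ V) :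
    ∀ x, pvReach loop connections seeds x → x ∈ V := by
  intro x hx
  induction hx with
  | seed s hs hne => exact (hseed s hs).resolve_left hne
  | step x t _ hsucc hne ih => exact (hclosed x ih t hsucc).resolve_left hne

-- the two traversals visit the same set of nodes: both compute exactly the pvReach-reachable nodes
theorem pv_counts_equal (loop : String) (connections : PvConn) (seeds : List String)
    (hU : ∀ t ∈ pvTargets connections, t ∈ seeds ++ pvTargets connections)
    (hq : ∀ x ∈ seeds, x ∈ seeds ++ pvTargets connections) :
    (pvBFS loop connections (seeds ++ pvTargets connections) hU PySem.Set.empty seeds hq).length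
      = (pvDFS loop connections (seeds ++ pvTargets connections) hU seeds PySem.Set.empty hq).1.length := by
  have hemp : ∀ v : String, v ∈ (PySem.Set.empty : PySem.Set String) → False := by
    intro v hv
    simp [PySem.Set.empty] at hv
  apply List.Perm.length_eq
  rw [List.perm_ext_iff_of_nodup
    (pvBFS_nodup loop connections _ hU PySem.Set.empty seeds hq List.nodup_nil)
    (pvDFS_nodup loop connections _ hU seeds PySem.Set.empty hq List.nodup_nil)]
  intro x
  have hpost := pvDFS_post loop connections _ hU seeds PySem.Set.empty hq
  have hbfs := pvBFS_closed loop connections _ hU seeds PySem.Set.empty seeds hq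
    (fun s hs => Or.inr (Or.inr hs)) (fun v hv => absurd (hemp v hv) not_false)
  constructor
  · intro hx
    have hr : pvReach loop connections seeds x :=
      pvBFS_sound loop connections _ hU seeds PySem.Set.empty seeds hq
        (fun v hv => absurd (hemp v hv) not_false)
        (fun q hq' hne => pvReach.seed q hq' hne) x hx
    refine pvReach_subset loop connections seeds _ hpost.1 ?_ x hr
    intro v hv t ht
    rcases hpost.2 v hv with hin | hcl
    · exact absurd (hemp v hin) not_false
    · exact hcl t ht
  · intro hx
    have hr : pvReach loop connections seeds x :=
      pvDFS_sound loop connections _ hU seeds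
        seeds PySem.Set.empty hq
        (fun v hv => absurd (hemp v hv) not_false)
        (fun q hq' hne => pvReach.seed q hq' hne) x hx
    exact pvReach_subset loop connections seeds _ hbfs.1 hbfs.2 x hr

-- ===== VERDICT (by name: the statement is the Claim_ definition above) =====
theorem count_loop_body_nodes_py_spec : Claim_equal_count_loop_body_nodes_py := by
  unfold Claim_equal_count_loop_body_nodes_py
  intro loop_node_name connections _
  unfold Spec_count_loop_body_nodes_py
  unfold count_loop_body_nodes_py count_loop_body_nodes_py_alt
  rcases pvGetMain connections loop_node_name with _ | ⟨first, restOut⟩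
  · rfl
  · dsimp only
    exact_mod_cast pv_counts_equal loop_node_name connections (first.filterMap pvEdgeNode?) _ _
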